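-- pv_equiv track=rewrite | github.com/programjames/Cipher | cipher.py | scramble_recursion2
-- ===== SOURCE A (Python) =====
-- def scramble_recursion2(character_list,words,word_list):
--     if character_list==():
--         return words
--     valid_combos=[]
--     for word in word_list:
--         c_list=[c for c in word]
--         if(len(c_list)<=len(character_list)):
--             for i in range(len(c_list)):
--                 if c_list[i]!=character_list[i]:
--                     break
--             else:
--                 new_character_list=character_list[len(c_list):]
--                 new_words=words+[word]
--                 for combo in scramble_recursion2(new_character_list,new_words,word_list):
--                     valid_combos.append(combo)
--     return valid_combos
-- ===== SOURCE B (Python) =====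
-- def scramble_recursion2(character_list, words, word_list):
--     # Same enumeration as A, but instead of rescanning all of word_list (with a
--     # character-by-character compare) at every DFS node, precompute the matching
--     # words for every start position once, then walk that table.
--     n = len(character_list)
--     matches = []
--     for pos in range(n):
--         row = [w for w in word_list
--                if w and list(character_list[pos:pos + len(w)]) == list(w)]
--         matches.append(row)
--     out = []
--
--     def dfs(pos, chosen):
--         if pos == n:
--             out.extend(words)
--             out.extend(chosen)
--             return
--         for w in matches[pos]:
--             dfs(pos + len(w), chosen + [w])
--
--     dfs(0, [])
--     return out
-- ===== Notes on version B (the rewrite author's own statement) =====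
-- stated objective: alternative
-- what changed: A rescans all of word_list with a character-by-character prefix compare at every node of its recursion; B precomputes the matching words for every start position once into a table and its DFS only walks that table, accumulating the output with an explicit position index instead of re-slicing the character list.
import Mathlib
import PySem

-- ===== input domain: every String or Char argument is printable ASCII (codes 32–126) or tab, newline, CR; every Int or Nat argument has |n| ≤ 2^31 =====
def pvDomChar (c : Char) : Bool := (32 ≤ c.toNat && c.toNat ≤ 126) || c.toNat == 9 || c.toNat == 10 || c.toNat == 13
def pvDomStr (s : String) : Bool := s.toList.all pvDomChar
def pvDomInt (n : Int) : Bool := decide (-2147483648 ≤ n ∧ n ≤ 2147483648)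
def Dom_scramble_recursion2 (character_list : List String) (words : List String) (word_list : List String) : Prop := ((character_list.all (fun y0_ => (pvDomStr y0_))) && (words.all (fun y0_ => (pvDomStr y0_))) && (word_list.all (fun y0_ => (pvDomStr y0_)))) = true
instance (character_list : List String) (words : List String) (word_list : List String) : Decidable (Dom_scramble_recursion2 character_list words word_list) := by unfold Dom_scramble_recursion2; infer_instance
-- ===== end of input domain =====

-- B replaces A's per-node rescan of word_list with a per-position match table computed once,
-- walked by an index-based DFS; same output, different traversal of the data.

-- Python's [c for c in word]: the characters of a word as one-character strings
def pvChars (w : String) : List String := w.toList.map (fun c => String.ofList [c])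

-- ===== PORT A =====
-- Fuelled transliteration of A's recursion: fuel character_list.length + 1 covers every depth the
-- Python recursion reaches when it terminates; fuel 0 is reached only where Python recurses forever
-- on an empty word (an input Pre_ excludes, where Python raises RecursionError).
def pvScrA (character_list words word_list : List String) (fuel : Nat) : List String :=
  match fuel with
  | 0 => []  -- Python diverges past this depth (only with an empty word in word_list; outside Pre_)
  | fuel + 1 =>
    -- Python: `character_list == ()` (character_list is passed as a tuple; tuple → List String)
    if character_list = [] then words
    else
      word_list.foldl (fun valid_combos word =>
        if (pvChars word).length ≤ character_list.length then
          -- for i in range(len(c_list)): if c_list[i] != character_list[i]: break / else: recurse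
          if (PySem.List.enumerate (pvChars word)).all
              (fun ic => PySem.List.pyGet? character_list ic.1 == some ic.2) then
            valid_combos ++
              pvScrA (PySem.List.slice character_list (some ((pvChars word).length : Int)) none)
                (words ++ [word]) word_list fuel
          else valid_combos
        else valid_combos) []

def scramble_recursion2 (character_list : List String) (words : List String) (word_list : List String) : List String :=
  pvScrA character_list words word_list (character_list.length + 1)

-- ===== PORT B =====
-- row of B's match table: the (nonempty) words of word_list matching character_list at position pos
def pvMatchRow (character_list word_list : List String) (pos : Nat) : List String :=
  word_list.filter (fun w =>
    decide (w ≠ "") &&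
      (PySem.List.slice character_list (some (pos : Int)) (some ((pos : Int) + ((pvChars w).length : Int)))
        == pvChars w))

-- B's dfs, fuelled for totality: the table only contains nonempty matches that fit, so the position
-- strictly grows and fuel character_list.length + 1 is never exhausted.
def pvDfs (character_list words word_list : List String) (table : List (List String)) :
    Nat → Nat → List String → List String
  | 0, _, _ => []
  | fuel + 1, pos, chosen =>
    if pos = character_list.length then words ++ chosen
    else
      (table.getD pos []).foldl
        (fun out w => out ++ pvDfs character_list words word_list table fuel (pos + (pvChars w).length) (chosen ++ [w]))
        []

def scramble_recursion2_alt (character_list : List String) (words : List String) (word_list : List String) : List String :=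
  let table := (List.range character_list.length).map (fun pos => pvMatchRow character_list word_list pos)
  pvDfs character_list words word_list table (character_list.length + 1) 0 []

-- ===== PRECONDITION & SPEC =====
-- Pre_ excludes word_list containing "" (unless character_list is empty, where A returns words at
-- once): there Python A prefix-matches the empty word forever and raises RecursionError.
def Pre_scramble_recursion2 (character_list : List String) (words : List String) (word_list : List String) : Prop :=
  character_list = [] ∨ "" ∉ word_list
instance (character_list : List String) (words : List String) (word_list : List String) : Decidable (Pre_scramble_recursion2 character_list words word_list) := by unfold Pre_scramble_recursion2; infer_instance

def pvWitness_scramble_recursion2 : List String × List String × List String := (["a", "b"], [], ["a", "b", "ab"])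

def Spec_scramble_recursion2 (character_list : List String) (words : List String) (word_list : List String) (out : List String) : Prop := out = scramble_recursion2_alt character_list words word_list
instance (character_list : List String) (words : List String) (word_list : List String) (out : List String) : Decidable (Spec_scramble_recursion2 character_list words word_list out) := by unfold Spec_scramble_recursion2; infer_instance

-- ===== CLAIM (what is proved, stated in full; the proofs are below) =====
def Claim_equal_scramble_recursion2 : Prop := ∀ (character_list : List String) (words : List String) (word_list : List String), Dom_scramble_recursion2 character_list words word_list → Pre_scramble_recursion2 character_list words word_list → Spec_scramble_recursion2 character_list words word_list (scramble_recursion2 character_list words word_list)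

-- ===== LEMMAS AND PROOFS =====

theorem pvChars_len_pos {w : String} (h : w ≠ "") : 0 < (pvChars w).length := by
  simp only [pvChars, List.length_map]
  cases hw : w.toList with
  | nil =>
    exfalso
    apply h
    have := congrArg String.ofList hw
    simpa using this
  | cons a l => simp

-- A's inner character loop is a prefix test
theorem pv_enum_all : ∀ (cs : List String) (s : Nat) (xs : List String), s + cs.length ≤ xs.length →
    ((((PySem.List.enumerate cs (s : Int)).all
        (fun ic => PySem.List.pyGet? xs ic.1 == some ic.2)) = true)
      ↔ (xs.drop s).take cs.length = cs) := by
  intro cs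
  induction cs with
  | nil =>
    intro s xs _
    rw [show PySem.List.enumerate ([] : List String) ((s : Nat) : Int) = [] from rfl]
    simp only [List.all_nil, List.length_nil, List.take_zero]
  | cons c cs ih =>
    intro s xs hle
    have hs : s < xs.length := by simp at hle; omega
    rw [PySem.List.enumerate_cons]
    have hdrop : xs.drop s = xs[s] :: xs.drop (s + 1) := List.drop_eq_getElem_cons hs
    simp only [List.all_cons, Bool.and_eq_true, hdrop, List.length_cons, List.take_succ_cons,
      List.cons.injEq]
    have hget : PySem.List.pyGet? xs (s : Int) = some xs[s] := by
      rw [PySem.List.pyGet?_natCast]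
      exact List.getElem?_eq_getElem hs
    have hcast : ((s : Int) + 1) = (((s + 1 : Nat)) : Int) := by push_cast; ring
    rw [hget, hcast, ih (s + 1) xs (by simp at hle ⊢; omega)]
    simp only [beq_iff_eq, Option.some.injEq]

-- a guarded append-fold is a flatMap over the filtered list
theorem pv_foldl_ite_flatMap {α β : Type} (p : α → Bool) (g : α → List β) :
    ∀ (l : List α) (acc : List β),
      l.foldl (fun a x => if p x then a ++ g x else a) acc = acc ++ (l.filter p).flatMap g := by
  intro l
  induction l with
  | nil => intro acc; simp
  | cons x l ih =>
    intro acc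
    by_cases hx : p x = true
    · simp [List.foldl_cons, hx, ih]
    · have hx' : p x = false := Bool.eq_false_iff.mpr hx
      simp [List.foldl_cons, hx', ih]

theorem tableRow (cl wl : List String) (pos : Nat) (h : pos < cl.length) :
    ((List.range cl.length).map (fun p => pvMatchRow cl wl p)).getD pos [] = pvMatchRow cl wl pos := by
  rw [List.getD_eq_getElem?_getD, List.getElem?_map, List.getElem?_range h]
  rfl

-- The heart: with no empty word available, B's table-walking DFS computes exactly A's recursion
-- on the remaining suffix, with A's words accumulator split into the initial words and the chosen
-- prefix words.
theorem pvDfs_eq_pvScrA (cl words wl : List String) (hw : "" ∉ wl) :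
    ∀ (fuel pos : Nat) (chosen : List String), pos ≤ cl.length → cl.length - pos < fuel →
      pvDfs cl words wl ((List.range cl.length).map (fun p => pvMatchRow cl wl p)) fuel pos chosen
        = pvScrA (cl.drop pos) (words ++ chosen) wl fuel := by
  intro fuel
  induction fuel with
  | zero => intro pos chosen _ h; omega
  | succ fuel ih =>
    intro pos chosen hpos hfuel
    by_cases hp : pos = cl.length
    · subst hp
      have hdrop : cl.drop cl.length = [] := by simp
      simp [pvDfs, pvScrA, hdrop]
    · have hlt : pos < cl.length := by omega
      have hne : cl.drop pos ≠ [] := by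
        intro h
        have := congrArg List.length h
        simp only [List.length_drop] at this
        simp at this
        omega
      simp only [pvDfs, if_neg hp, tableRow cl wl pos hlt, PySem.List.foldl_append_eq_flatMap,
        List.nil_append]
      rw [pvScrA, if_neg hne]
      -- A's nested ifs as one guarded step
      have hfun : (fun (valid_combos : List String) (word : String) =>
          if (pvChars word).length ≤ (cl.drop pos).length then
            if (PySem.List.enumerate (pvChars word)).all
                (fun ic => PySem.List.pyGet? (cl.drop pos) ic.1 == some ic.2) then
              valid_combos ++
                pvScrA (PySem.List.slice (cl.drop pos) (some ((pvChars word).length : Int)) none)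
                  (words ++ chosen ++ [word]) wl fuel
            else valid_combos
          else valid_combos)
          = (fun (valid_combos : List String) (word : String) =>
              if (decide ((pvChars word).length ≤ (cl.drop pos).length) &&
                  (PySem.List.enumerate (pvChars word)).all
                    (fun ic => PySem.List.pyGet? (cl.drop pos) ic.1 == some ic.2)) = true then
                valid_combos ++
                  pvScrA (PySem.List.slice (cl.drop pos) (some ((pvChars word).length : Int)) none)
                    (words ++ chosen ++ [word]) wl fuel
              else valid_combos) := by
        funext a w
        by_cases h1 : (pvChars w).length ≤ (cl.drop pos).length
        · by_cases h2 : ((PySem.List.enumerate (pvChars w)).all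
              (fun ic => PySem.List.pyGet? (cl.drop pos) ic.1 == some ic.2)) = true
          · rw [if_pos h1, if_pos h2,
              if_pos (show _ = true by
                simp only [Bool.and_eq_true, decide_eq_true_eq]
                exact ⟨h1, h2⟩)]
          · rw [if_pos h1, if_neg h2,
              if_neg (show ¬ _ = true by
                simp only [Bool.and_eq_true, decide_eq_true_eq]
                exact fun hc => h2 hc.2)]
        · rw [if_neg h1,
            if_neg (show ¬ _ = true by
              simp only [Bool.and_eq_true, decide_eq_true_eq]
              exact fun hc => h1 hc.1)]
      rw [hfun, pv_foldl_ite_flatMap, List.nil_append]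
      -- the two guards select the same words of wl
      have hguard : ∀ w ∈ wl,
          (decide ((pvChars w).length ≤ (cl.drop pos).length) &&
            (PySem.List.enumerate (pvChars w)).all
              (fun ic => PySem.List.pyGet? (cl.drop pos) ic.1 == some ic.2))
          = (decide (w ≠ "") &&
              (PySem.List.slice cl (some (pos : Int)) (some ((pos : Int) + ((pvChars w).length : Int)))
                == pvChars w)) := by
        intro w hwmem
        have hne' : w ≠ "" := fun h => hw (h ▸ hwmem)
        rw [PySem.List.slice_natCast_add]
        by_cases hlen : (pvChars w).length ≤ cl.length - pos
        · have henum := pv_enum_all (pvChars w) 0 (cl.drop pos)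
            (by simp only [List.length_drop]; omega)
          simp only [Nat.cast_zero, List.drop_zero] at henum
          by_cases hall : ((PySem.List.enumerate (pvChars w) (0 : Int)).all
              (fun ic => PySem.List.pyGet? (cl.drop pos) ic.1 == some ic.2)) = true
          · have htake := henum.mp hall
            simp [hlen, hall, hne', htake]
          · have htake' : ¬ (cl.drop pos).take (pvChars w).length = pvChars w :=
              fun h => hall (henum.mpr h)
            simp [hlen, Bool.eq_false_iff.mpr hall, hne', htake']
        · have htake' : ¬ (cl.drop pos).take (pvChars w).length = pvChars w := by
            intro h
            have := congrArg List.length h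
            rw [List.length_take] at this
            simp only [List.length_drop] at this
            omega
          simp [hlen, hne', beq_iff_eq, htake']
      have hrow : pvMatchRow cl wl pos = wl.filter (fun word =>
          decide ((pvChars word).length ≤ (cl.drop pos).length) &&
            (PySem.List.enumerate (pvChars word)).all
              (fun ic => PySem.List.pyGet? (cl.drop pos) ic.1 == some ic.2)) := by
        unfold pvMatchRow
        exact List.filter_congr (fun w hwmem => (hguard w hwmem).symm)
      rw [hrow]
      apply List.flatMap_congr
      intro w hwmem
      rw [List.mem_filter] at hwmem
      obtain ⟨hwl, hpred⟩ := hwmem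
      simp only [Bool.and_eq_true, decide_eq_true_eq] at hpred
      obtain ⟨hlenw, hall⟩ := hpred
      have hne' : w ≠ "" := fun h => hw (h ▸ hwl)
      have htake : (cl.drop pos).take (pvChars w).length = pvChars w := by
        have henum := pv_enum_all (pvChars w) 0 (cl.drop pos) (by simpa using hlenw)
        simp only [Nat.cast_zero, List.drop_zero] at henum
        exact henum.mp hall
      have hk : 0 < (pvChars w).length := pvChars_len_pos hne'
      have hle : (pvChars w).length ≤ cl.length - pos := by
        simp only [List.length_drop] at hlenw
        omega
      rw [PySem.List.slice_from_natCast, List.drop_drop]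
      rw [ih (pos + (pvChars w).length) (chosen ++ [w]) (by omega) (by omega)]
      rw [← List.append_assoc]

-- ===== VERDICT (by name: the statement is the Claim_ definition above) =====
theorem scramble_recursion2_spec : Claim_equal_scramble_recursion2 := by
  intro cl words wl _ hpre
  unfold Spec_scramble_recursion2 scramble_recursion2 scramble_recursion2_alt
  by_cases hcl : cl = []
  · subst hcl
    simp [pvScrA, pvDfs]
  · have hw : "" ∉ wl := hpre.resolve_left hcl
    rw [pvDfs_eq_pvScrA cl words wl hw (cl.length + 1) 0 [] (by omega) (by omega)]
    simp
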